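-- pv_equiv track=rewrite | github.com/kh277/BOJ | 백준/Platinum/32190. Ian Sequences/Ian Sequences.py | solve
-- ===== SOURCE A (Python) =====
-- from collections import deque
--
-- def solve(N):
--     q = deque()
--     q.append(1)
--
--     if N % 2 == 1:
--         for i in range(1, N//2+1):
--             q.append(i*2+1)
--             q.appendleft(i*2+1)
--             q.append(i*2)
--             q.appendleft(i*2)
--         q.append(1)
--     else:
--         for i in range(1, N//2):
--             q.append(i*2+1)
--             q.appendleft(i*2+1)
--             q.append(i*2)
--             q.appendleft(i*2)
--
--         q.append(N)
--         q.append(1)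
--         q.append(N)
--
--     return list(q)
-- ===== SOURCE B (Python) =====
-- def solve(N):
--     k = N // 2
--     hi = k + 1 if N % 2 == 1 else k
--     right = [v for i in range(1, hi) for v in (2 * i + 1, 2 * i)]
--     left = [v for i in range(hi - 1, 0, -1) for v in (2 * i, 2 * i + 1)]
--     tail = [1] if N % 2 == 1 else [N, 1, N]
--     return left + [1] + right + tail
-- ===== Notes on version B (the rewrite author's own statement) =====
-- stated objective: simpler
-- what changed: B replaces the deque grown outward from the center (append/appendleft per iteration) by directly building the right half and the mirrored left half as separate lists and assembling the result by concatenation.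
import Mathlib
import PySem

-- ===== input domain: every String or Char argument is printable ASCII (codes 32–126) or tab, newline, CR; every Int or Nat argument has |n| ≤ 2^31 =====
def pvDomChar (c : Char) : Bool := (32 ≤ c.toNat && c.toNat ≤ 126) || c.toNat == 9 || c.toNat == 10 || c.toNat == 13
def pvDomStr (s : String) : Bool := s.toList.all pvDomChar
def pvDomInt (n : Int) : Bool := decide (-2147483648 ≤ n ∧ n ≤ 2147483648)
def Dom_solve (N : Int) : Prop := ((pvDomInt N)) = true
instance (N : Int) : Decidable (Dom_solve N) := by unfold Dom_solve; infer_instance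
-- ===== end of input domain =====

-- B builds the two halves as separate lists by concatenation instead of growing a deque
-- from the center (objective: simpler decomposition, same cost).

-- ===== PORT A =====
-- the deque is a List Int; append = q ++ [x], appendleft = x :: q
def solveStep (q : List Int) (i : Int) : List Int :=
  -- append i*2+1; appendleft i*2+1; append i*2; appendleft i*2
  i * 2 :: (((i * 2 + 1) :: (q ++ [i * 2 + 1])) ++ [i * 2])

def solve (N : Int) : List Int :=
  let q : List Int := [1]
  if PySem.Int.mod N 2 = 1 then
    ((PySem.List.pyRange 1 (PySem.Int.floordiv N 2 + 1) 1).foldl solveStep q) ++ [1]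
  else
    ((PySem.List.pyRange 1 (PySem.Int.floordiv N 2) 1).foldl solveStep q) ++ [N, 1, N]

-- ===== PORT B =====
def solve_alt (N : Int) : List Int :=
  let k := PySem.Int.floordiv N 2
  let hi := if PySem.Int.mod N 2 = 1 then k + 1 else k
  let right := (PySem.List.pyRange 1 hi 1).flatMap (fun i => [2 * i + 1, 2 * i])
  let left := (PySem.List.pyRange (hi - 1) 0 (-1)).flatMap (fun i => [2 * i, 2 * i + 1])
  let tail := if PySem.Int.mod N 2 = 1 then [1] else [N, 1, N]
  left ++ [1] ++ right ++ tail

-- ===== PRECONDITION & SPEC =====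
def Spec_solve (N : Int) (out : List Int) : Prop := out = solve_alt N
instance (N : Int) (out : List Int) : Decidable (Spec_solve N out) := by unfold Spec_solve; infer_instance

-- ===== CLAIM (what is proved, stated in full; the proofs are below) =====
def Claim_equal_solve : Prop := ∀ (N : Int), Dom_solve N → Spec_solve N (solve N)

-- ===== LEMMAS AND PROOFS =====

-- the center-out deque loop equals left half ++ seed ++ right half
theorem solve_loop_eq (m : Nat) (q0 : List Int) :
    (PySem.List.pyRange 1 (1 + (m : Int)) 1).foldl solveStep q0
      = (PySem.List.pyRange (m : Int) 0 (-1)).flatMap (fun i => [2 * i, 2 * i + 1])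
        ++ q0
        ++ (PySem.List.pyRange 1 (1 + (m : Int)) 1).flatMap (fun i => [2 * i + 1, 2 * i]) := by
  induction m generalizing q0 with
  | zero =>
      simp [PySem.List.pyRange_one_eq_nil (by omega : (1:Int) ≤ 1),
            PySem.List.pyRange_neg_one_eq_nil (by omega : (0:Int) ≤ 0)]
  | succ m ih =>
      have h1 : (1 + ((m + 1 : Nat) : Int)) = (1 + (m : Int)) + 1 := by push_cast; ring
      rw [h1, PySem.List.pyRange_one_succ_right (by omega : (1:Int) ≤ 1 + (m : Int)),
          PySem.List.pyRange_neg_one_cons (by omega : (0:Int) < ((m + 1 : Nat) : Int))]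
      rw [List.foldl_append, ih]
      have h2 : ((m + 1 : Nat) : Int) - 1 = (m : Int) := by push_cast; ring
      have h3 : ((m + 1 : Nat) : Int) = 1 + (m : Int) := by push_cast; ring
      simp only [List.foldl_cons, List.foldl_nil, solveStep, List.flatMap_append,
        List.flatMap_cons, List.flatMap_nil, h3]
      simp [List.append_assoc, mul_comm]

-- both sides in the degenerate case: empty loop on either side
theorem solve_loop_empty (b : Int) (hb : b ≤ 1) (q0 : List Int) :
    (PySem.List.pyRange 1 b 1).foldl solveStep q0 = q0 := by
  rw [PySem.List.pyRange_one_eq_nil hb]; rfl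

theorem solve_halves (b : Int) (q0 : List Int) :
    (PySem.List.pyRange 1 b 1).foldl solveStep q0
      = (PySem.List.pyRange (b - 1) 0 (-1)).flatMap (fun i => [2 * i, 2 * i + 1])
        ++ q0
        ++ (PySem.List.pyRange 1 b 1).flatMap (fun i => [2 * i + 1, 2 * i]) := by
  by_cases hb : b ≤ 1
  · rw [solve_loop_empty b hb,
        PySem.List.pyRange_one_eq_nil hb,
        PySem.List.pyRange_neg_one_eq_nil (by omega : b - 1 ≤ 0)]
    simp
  · have hm : b = 1 + (((b - 1).toNat : Nat) : Int) := by omega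
    rw [hm]
    rw [solve_loop_eq (b - 1).toNat q0]
    have h : (1 : Int) + (((b - 1).toNat : Nat) : Int) - 1 = (((b - 1).toNat : Nat) : Int) := by omega
    rw [h]

-- ===== VERDICT (by name: the statement is the Claim_ definition above) =====
theorem solve_spec : Claim_equal_solve := by
  intro N _
  unfold Spec_solve solve solve_alt
  by_cases hpar : PySem.Int.mod N 2 = 1
  · simp only [hpar, if_true]
    rw [solve_halves]
  · simp only [hpar, if_false]
    rw [solve_halves]
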